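-- pv_equiv track=rewrite | github.com/NoUnique/robust-lid | src/robust_lid/utils.py | _classify_char
-- ===== SOURCE A (Python) =====
-- _SCRIPT_RANGES: dict[str, tuple[int, int]] = {
--     "Hang": (0xAC00, 0xD7A3),
--     "Hani": (0x4E00, 0x9FFF),
--     "Hira": (0x3040, 0x309F),
--     "Kana": (0x30A0, 0x30FF),
--     "Arab": (0x0600, 0x06FF),
--     "Cyrl": (0x0400, 0x04FF),
--     "Deva": (0x0900, 0x097F),  # Devanagari (Hindi, Marathi, Sanskrit, Nepali)
--     "Beng": (0x0980, 0x09FF),  # Bengali / Assamese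
--     "Thai": (0x0E00, 0x0E7F),
--     "Grek": (0x0370, 0x03FF),
--     "Hebr": (0x0590, 0x05FF),
-- }
--
-- _LATIN_RANGES: tuple[tuple[int, int], ...] = (
--     (0x0041, 0x005A),  # A-Z
--     (0x0061, 0x007A),  # a-z
--     (0x00C0, 0x024F),  # Latin-1 Supplement + Extended-A/B
-- )
--
-- def _classify_char(cp: int) -> str | None:
--     for start, end in _LATIN_RANGES:
--         if start <= cp <= end:
--             return "Latn"
--     for script, (start, end) in _SCRIPT_RANGES.items():
--         if start <= cp <= end:
--             return script
--     return None
-- ===== SOURCE B (Python) =====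
-- # Single sorted table of disjoint (start, end, label) ranges + binary search,
-- # instead of two sequential linear scans.
-- _SCRIPT_RANGES: dict[str, tuple[int, int]] = {
--     "Hang": (0xAC00, 0xD7A3),
--     "Hani": (0x4E00, 0x9FFF),
--     "Hira": (0x3040, 0x309F),
--     "Kana": (0x30A0, 0x30FF),
--     "Arab": (0x0600, 0x06FF),
--     "Cyrl": (0x0400, 0x04FF),
--     "Deva": (0x0900, 0x097F),
--     "Beng": (0x0980, 0x09FF),
--     "Thai": (0x0E00, 0x0E7F),
--     "Grek": (0x0370, 0x03FF),
--     "Hebr": (0x0590, 0x05FF),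
-- }
--
-- _LATIN_RANGES: tuple[tuple[int, int], ...] = (
--     (0x0041, 0x005A),
--     (0x0061, 0x007A),
--     (0x00C0, 0x024F),
-- )
--
-- _RANGES = sorted(
--     [(s, e, "Latn") for s, e in _LATIN_RANGES]
--     + [(s, e, lab) for lab, (s, e) in _SCRIPT_RANGES.items()]
-- )
-- _STARTS = [r[0] for r in _RANGES]
--
--
-- def _bisect_right(a, x):
--     lo, hi = 0, len(a)
--     while lo < hi:
--         mid = (lo + hi) // 2
--         if x < a[mid]:
--             hi = mid
--         else:
--             lo = mid + 1
--     return lo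
--
--
-- def _classify_char(cp: int) -> str | None:
--     i = _bisect_right(_STARTS, cp)
--     if i:
--         start, end, label = _RANGES[i - 1]
--         if cp <= end:
--             return label
--     return None
-- ===== Notes on version B (the rewrite author's own statement) =====
-- stated objective: alternative
-- what changed: Replaces the two sequential linear scans over the Latin and script range tables by one flattened (start,end,label) table sorted by start at import time, located per call with a hand-written bisect_right binary search over the starts.
import Mathlib
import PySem

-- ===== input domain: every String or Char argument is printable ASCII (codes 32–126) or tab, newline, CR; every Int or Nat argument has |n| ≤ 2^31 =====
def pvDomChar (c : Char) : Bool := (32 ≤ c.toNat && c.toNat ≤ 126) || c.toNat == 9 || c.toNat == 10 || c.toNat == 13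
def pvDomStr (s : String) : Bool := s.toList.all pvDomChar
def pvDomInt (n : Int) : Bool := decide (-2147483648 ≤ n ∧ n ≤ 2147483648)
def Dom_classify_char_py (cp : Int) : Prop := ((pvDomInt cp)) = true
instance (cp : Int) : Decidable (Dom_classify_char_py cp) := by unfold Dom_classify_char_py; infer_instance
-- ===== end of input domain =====

-- B replaces A's two sequential linear scans by one pre-sorted flattened range table
-- searched with a binary search (alternative decomposition; same observable result).


-- ===== PORT A =====
-- the module-level tables, as A has them
def pvLatinRanges : List (Int × Int) := [(0x41, 0x5A), (0x61, 0x7A), (0xC0, 0x24F)]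
def pvScriptRanges : List (String × (Int × Int)) :=
  [("Hang", (0xAC00, 0xD7A3)), ("Hani", (0x4E00, 0x9FFF)), ("Hira", (0x3040, 0x309F)),
   ("Kana", (0x30A0, 0x30FF)), ("Arab", (0x0600, 0x06FF)), ("Cyrl", (0x0400, 0x04FF)),
   ("Deva", (0x0900, 0x097F)), ("Beng", (0x0980, 0x09FF)), ("Thai", (0x0E00, 0x0E7F)),
   ("Grek", (0x0370, 0x03FF)), ("Hebr", (0x0590, 0x05FF))]

-- first loop of A: scan the Latin ranges, early-return "Latn"
def pvLatinLoop (rs : List (Int × Int)) (cp : Int) : Option String :=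
  match rs with
  | [] => none
  | r :: t => if r.1 ≤ cp ∧ cp ≤ r.2 then some "Latn" else pvLatinLoop t cp

-- second loop of A: scan the script dict items, early-return the script name
def pvScriptLoop (rs : List (String × (Int × Int))) (cp : Int) : Option String :=
  match rs with
  | [] => none
  | r :: t => if r.2.1 ≤ cp ∧ cp ≤ r.2.2 then some r.1 else pvScriptLoop t cp

def classify_char_py (cp : Int) : Option String :=
  match pvLatinLoop pvLatinRanges cp with
  | some r => some r
  | none =>
    match pvScriptLoop pvScriptRanges cp with
    | some r => some r
    | none => none

-- ===== PORT B =====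
-- _RANGES: the flattened list sorted by start (sorted at import time in Source B)
def pvRanges : List (Int × Int × String) :=
  [(0x41, 0x5A, "Latn"), (0x61, 0x7A, "Latn"), (0xC0, 0x24F, "Latn"),
   (0x370, 0x3FF, "Grek"), (0x400, 0x4FF, "Cyrl"), (0x590, 0x5FF, "Hebr"),
   (0x600, 0x6FF, "Arab"), (0x900, 0x97F, "Deva"), (0x980, 0x9FF, "Beng"),
   (0xE00, 0xE7F, "Thai"), (0x3040, 0x309F, "Hira"), (0x30A0, 0x30FF, "Kana"),
   (0x4E00, 0x9FFF, "Hani"), (0xAC00, 0xD7A3, "Hang")]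

def pvStarts : List Int := pvRanges.map (·.1)

-- Source B's _bisect_right loop, step for step (while lo < hi: mid = (lo+hi)//2 ...)
def pvBisectRight (a : List Int) (x : Int) (lo hi : Nat) : Nat :=
  if lo < hi then
    let mid := (lo + hi) / 2
    if x < a.getD mid 0 then pvBisectRight a x lo mid
    else pvBisectRight a x (mid + 1) hi
  else lo
termination_by hi - lo
decreasing_by all_goals omega

def classify_char_py_alt (cp : Int) : Option String :=
  let i := pvBisectRight pvStarts cp 0 pvStarts.length
  if i ≠ 0 then
    match pvRanges.getD (i - 1) (0, 0, "") with
    | (_, e, label) => if cp ≤ e then some label else none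
  else none

-- ===== PRECONDITION & SPEC =====
def Spec_classify_char_py (cp : Int) (out : Option String) : Prop := out = classify_char_py_alt cp
instance (cp : Int) (out : Option String) : Decidable (Spec_classify_char_py cp out) := by unfold Spec_classify_char_py; infer_instance

-- ===== CLAIM (what is proved, stated in full; the proofs are below) =====
def Claim_equal_classify_char_py : Prop := ∀ (cp : Int), Dom_classify_char_py cp → Spec_classify_char_py cp (classify_char_py cp)

-- ===== LEMMAS AND PROOFS =====

-- binary-search invariant: on a sorted list, pvBisectRight returns an insertion
-- point r with a[j] <= x for all j < r and x < a[j] for all r <= j < len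
theorem pvBisect_spec (a : List Int) (x : Int)
    (hsort : ∀ i j, i ≤ j → j < a.length → a.getD i 0 ≤ a.getD j 0) :
    ∀ n lo hi, hi - lo = n → lo ≤ hi → hi ≤ a.length →
    (∀ j, j < lo → a.getD j 0 ≤ x) →
    (∀ j, hi ≤ j → j < a.length → x < a.getD j 0) →
    pvBisectRight a x lo hi ≤ a.length ∧
    (∀ j, j < pvBisectRight a x lo hi → a.getD j 0 ≤ x) ∧
    (∀ j, pvBisectRight a x lo hi ≤ j → j < a.length → x < a.getD j 0) := by
  intro n
  induction n using Nat.strong_induction_on with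
  | _ n ih =>
    intro lo hi hn hle hlen hlo hhi
    rw [pvBisectRight]
    by_cases h : lo < hi
    · simp only [if_pos h]
      by_cases hx : x < a.getD ((lo + hi) / 2) 0
      · simp only [if_pos hx]
        exact ih ((lo + hi) / 2 - lo) (by omega) lo ((lo + hi) / 2) rfl (by omega)
          (by omega) hlo
          (fun j hj hjl => lt_of_lt_of_le hx (hsort _ j hj hjl))
      · simp only [if_neg hx]
        refine ih (hi - ((lo + hi) / 2 + 1)) (by omega) ((lo + hi) / 2 + 1) hi rfl
          (by omega) hlen (fun j hj => ?_) hhi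
        by_cases hjlo : j < lo
        · exact hlo j hjlo
        · exact le_trans (hsort j ((lo + hi) / 2) (by omega) (by omega)) (not_lt.mp hx)
    · simp only [if_neg h]
      exact ⟨by omega, hlo, fun j hj => hhi j (by omega)⟩

-- the 14 starts of pvRanges are sorted
theorem pvStarts_sorted : ∀ i j, i ≤ j → j < pvStarts.length → pvStarts.getD i 0 ≤ pvStarts.getD j 0 := by
  have H : ∀ j, j < 14 → ∀ i, i < 14 → i ≤ j → pvStarts.getD i 0 ≤ pvStarts.getD j 0 := by decide
  intro i j hij hj
  exact H j hj i (lt_of_le_of_lt hij hj) hij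

-- A's two loops, unfolded on their literal tables (definitional)
theorem pvLatin_eq (cp : Int) : pvLatinLoop pvLatinRanges cp = (if (65 : Int) ≤ cp ∧ cp ≤ (90 : Int) then some "Latn" else (if (97 : Int) ≤ cp ∧ cp ≤ (122 : Int) then some "Latn" else (if (192 : Int) ≤ cp ∧ cp ≤ (591 : Int) then some "Latn" else ((none : Option String))))) := rfl

theorem pvScript_eq (cp : Int) : pvScriptLoop pvScriptRanges cp = (if (44032 : Int) ≤ cp ∧ cp ≤ (55203 : Int) then some "Hang" else (if (19968 : Int) ≤ cp ∧ cp ≤ (40959 : Int) then some "Hani" else (if (12352 : Int) ≤ cp ∧ cp ≤ (12447 : Int) then some "Hira" else (if (12448 : Int) ≤ cp ∧ cp ≤ (12543 : Int) then some "Kana" else (if (1536 : Int) ≤ cp ∧ cp ≤ (1791 : Int) then some "Arab" else (if (1024 : Int) ≤ cp ∧ cp ≤ (1279 : Int) then some "Cyrl" else (if (2304 : Int) ≤ cp ∧ cp ≤ (2431 : Int) then some "Deva" else (if (2432 : Int) ≤ cp ∧ cp ≤ (2559 : Int) then some "Beng" else (if (3584 : Int) ≤ cp ∧ cp ≤ (3711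 : Int) then some "Thai" else (if (880 : Int) ≤ cp ∧ cp ≤ (1023 : Int) then some "Grek" else (if (1424 : Int) ≤ cp ∧ cp ≤ (1535 : Int) then some "Hebr" else ((none : Option String))))))))))))) := rfl

-- A's match-chain written with Option.or
theorem pvA_or (cp : Int) :
    classify_char_py cp = (pvLatinLoop pvLatinRanges cp).or ((pvScriptLoop pvScriptRanges cp).or none) := by
  delta classify_char_py
  cases pvLatinLoop pvLatinRanges cp <;> cases pvScriptLoop pvScriptRanges cp <;> rfl

theorem pvCase0 (cp : Int) (hU : cp < (65 : Int)) :
    classify_char_py cp = ((none : Option String)) := by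
  rw [pvA_or, pvLatin_eq, pvScript_eq]
  rw [if_neg (show ¬((65 : Int) ≤ cp ∧ cp ≤ (90 : Int)) from by omega)]
  rw [if_neg (show ¬((97 : Int) ≤ cp ∧ cp ≤ (122 : Int)) from by omega)]
  rw [if_neg (show ¬((192 : Int) ≤ cp ∧ cp ≤ (591 : Int)) from by omega)]
  rw [if_neg (show ¬((44032 : Int) ≤ cp ∧ cp ≤ (55203 : Int)) from by omega)]
  rw [if_neg (show ¬((19968 : Int) ≤ cp ∧ cp ≤ (40959 : Int)) from by omega)]
  rw [if_neg (show ¬((12352 : Int) ≤ cp ∧ cp ≤ (12447 : Int)) from by omega)]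
  rw [if_neg (show ¬((12448 : Int) ≤ cp ∧ cp ≤ (12543 : Int)) from by omega)]
  rw [if_neg (show ¬((1536 : Int) ≤ cp ∧ cp ≤ (1791 : Int)) from by omega)]
  rw [if_neg (show ¬((1024 : Int) ≤ cp ∧ cp ≤ (1279 : Int)) from by omega)]
  rw [if_neg (show ¬((2304 : Int) ≤ cp ∧ cp ≤ (2431 : Int)) from by omega)]
  rw [if_neg (show ¬((2432 : Int) ≤ cp ∧ cp ≤ (2559 : Int)) from by omega)]
  rw [if_neg (show ¬((3584 : Int) ≤ cp ∧ cp ≤ (3711 : Int)) from by omega)]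
  rw [if_neg (show ¬((880 : Int) ≤ cp ∧ cp ≤ (1023 : Int)) from by omega)]
  rw [if_neg (show ¬((1424 : Int) ≤ cp ∧ cp ≤ (1535 : Int)) from by omega)]
  rfl

theorem pvCase1 (cp : Int) (hL : (65 : Int) ≤ cp) (hU : cp < (97 : Int)) :
    classify_char_py cp = (if cp ≤ (90 : Int) then some "Latn" else none) := by
  rw [pvA_or, pvLatin_eq, pvScript_eq]
  by_cases hE : cp ≤ (90 : Int)
  · rw [if_pos (show (65 : Int) ≤ cp ∧ cp ≤ (90 : Int) from ⟨by omega, hE⟩), if_pos hE]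
    rfl
  · rw [if_neg (show ¬((65 : Int) ≤ cp ∧ cp ≤ (90 : Int)) from fun h => hE h.2)]
    rw [if_neg (show ¬((97 : Int) ≤ cp ∧ cp ≤ (122 : Int)) from by omega)]
    rw [if_neg (show ¬((192 : Int) ≤ cp ∧ cp ≤ (591 : Int)) from by omega)]
    rw [if_neg (show ¬((44032 : Int) ≤ cp ∧ cp ≤ (55203 : Int)) from by omega)]
    rw [if_neg (show ¬((19968 : Int) ≤ cp ∧ cp ≤ (40959 : Int)) from by omega)]
    rw [if_neg (show ¬((12352 : Int) ≤ cp ∧ cp ≤ (12447 : Int)) from by omega)]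
    rw [if_neg (show ¬((12448 : Int) ≤ cp ∧ cp ≤ (12543 : Int)) from by omega)]
    rw [if_neg (show ¬((1536 : Int) ≤ cp ∧ cp ≤ (1791 : Int)) from by omega)]
    rw [if_neg (show ¬((1024 : Int) ≤ cp ∧ cp ≤ (1279 : Int)) from by omega)]
    rw [if_neg (show ¬((2304 : Int) ≤ cp ∧ cp ≤ (2431 : Int)) from by omega)]
    rw [if_neg (show ¬((2432 : Int) ≤ cp ∧ cp ≤ (2559 : Int)) from by omega)]
    rw [if_neg (show ¬((3584 : Int) ≤ cp ∧ cp ≤ (3711 : Int)) from by omega)]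
    rw [if_neg (show ¬((880 : Int) ≤ cp ∧ cp ≤ (1023 : Int)) from by omega)]
    rw [if_neg (show ¬((1424 : Int) ≤ cp ∧ cp ≤ (1535 : Int)) from by omega)]
    rw [if_neg hE]
    rfl

theorem pvCase2 (cp : Int) (hL : (97 : Int) ≤ cp) (hU : cp < (192 : Int)) :
    classify_char_py cp = (if cp ≤ (122 : Int) then some "Latn" else none) := by
  rw [pvA_or, pvLatin_eq, pvScript_eq]
  rw [if_neg (show ¬((65 : Int) ≤ cp ∧ cp ≤ (90 : Int)) from by omega)]
  by_cases hE : cp ≤ (122 : Int)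
  · rw [if_pos (show (97 : Int) ≤ cp ∧ cp ≤ (122 : Int) from ⟨by omega, hE⟩), if_pos hE]
    rfl
  · rw [if_neg (show ¬((97 : Int) ≤ cp ∧ cp ≤ (122 : Int)) from fun h => hE h.2)]
    rw [if_neg (show ¬((192 : Int) ≤ cp ∧ cp ≤ (591 : Int)) from by omega)]
    rw [if_neg (show ¬((44032 : Int) ≤ cp ∧ cp ≤ (55203 : Int)) from by omega)]
    rw [if_neg (show ¬((19968 : Int) ≤ cp ∧ cp ≤ (40959 : Int)) from by omega)]
    rw [if_neg (show ¬((12352 : Int) ≤ cp ∧ cp ≤ (12447 : Int)) from by omega)]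
    rw [if_neg (show ¬((12448 : Int) ≤ cp ∧ cp ≤ (12543 : Int)) from by omega)]
    rw [if_neg (show ¬((1536 : Int) ≤ cp ∧ cp ≤ (1791 : Int)) from by omega)]
    rw [if_neg (show ¬((1024 : Int) ≤ cp ∧ cp ≤ (1279 : Int)) from by omega)]
    rw [if_neg (show ¬((2304 : Int) ≤ cp ∧ cp ≤ (2431 : Int)) from by omega)]
    rw [if_neg (show ¬((2432 : Int) ≤ cp ∧ cp ≤ (2559 : Int)) from by omega)]
    rw [if_neg (show ¬((3584 : Int) ≤ cp ∧ cp ≤ (3711 : Int)) from by omega)]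
    rw [if_neg (show ¬((880 : Int) ≤ cp ∧ cp ≤ (1023 : Int)) from by omega)]
    rw [if_neg (show ¬((1424 : Int) ≤ cp ∧ cp ≤ (1535 : Int)) from by omega)]
    rw [if_neg hE]
    rfl

theorem pvCase3 (cp : Int) (hL : (192 : Int) ≤ cp) (hU : cp < (880 : Int)) :
    classify_char_py cp = (if cp ≤ (591 : Int) then some "Latn" else none) := by
  rw [pvA_or, pvLatin_eq, pvScript_eq]
  rw [if_neg (show ¬((65 : Int) ≤ cp ∧ cp ≤ (90 : Int)) from by omega)]
  rw [if_neg (show ¬((97 : Int) ≤ cp ∧ cp ≤ (122 : Int)) from by omega)]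
  by_cases hE : cp ≤ (591 : Int)
  · rw [if_pos (show (192 : Int) ≤ cp ∧ cp ≤ (591 : Int) from ⟨by omega, hE⟩), if_pos hE]
    rfl
  · rw [if_neg (show ¬((192 : Int) ≤ cp ∧ cp ≤ (591 : Int)) from fun h => hE h.2)]
    rw [if_neg (show ¬((44032 : Int) ≤ cp ∧ cp ≤ (55203 : Int)) from by omega)]
    rw [if_neg (show ¬((19968 : Int) ≤ cp ∧ cp ≤ (40959 : Int)) from by omega)]
    rw [if_neg (show ¬((12352 : Int) ≤ cp ∧ cp ≤ (12447 : Int)) from by omega)]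
    rw [if_neg (show ¬((12448 : Int) ≤ cp ∧ cp ≤ (12543 : Int)) from by omega)]
    rw [if_neg (show ¬((1536 : Int) ≤ cp ∧ cp ≤ (1791 : Int)) from by omega)]
    rw [if_neg (show ¬((1024 : Int) ≤ cp ∧ cp ≤ (1279 : Int)) from by omega)]
    rw [if_neg (show ¬((2304 : Int) ≤ cp ∧ cp ≤ (2431 : Int)) from by omega)]
    rw [if_neg (show ¬((2432 : Int) ≤ cp ∧ cp ≤ (2559 : Int)) from by omega)]
    rw [if_neg (show ¬((3584 : Int) ≤ cp ∧ cp ≤ (3711 : Int)) from by omega)]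
    rw [if_neg (show ¬((880 : Int) ≤ cp ∧ cp ≤ (1023 : Int)) from by omega)]
    rw [if_neg (show ¬((1424 : Int) ≤ cp ∧ cp ≤ (1535 : Int)) from by omega)]
    rw [if_neg hE]
    rfl

theorem pvCase4 (cp : Int) (hL : (880 : Int) ≤ cp) (hU : cp < (1024 : Int)) :
    classify_char_py cp = (if cp ≤ (1023 : Int) then some "Grek" else none) := by
  rw [pvA_or, pvLatin_eq, pvScript_eq]
  rw [if_neg (show ¬((65 : Int) ≤ cp ∧ cp ≤ (90 : Int)) from by omega)]
  rw [if_neg (show ¬((97 : Int) ≤ cp ∧ cp ≤ (122 : Int)) from by omega)]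
  rw [if_neg (show ¬((192 : Int) ≤ cp ∧ cp ≤ (591 : Int)) from by omega)]
  rw [if_neg (show ¬((44032 : Int) ≤ cp ∧ cp ≤ (55203 : Int)) from by omega)]
  rw [if_neg (show ¬((19968 : Int) ≤ cp ∧ cp ≤ (40959 : Int)) from by omega)]
  rw [if_neg (show ¬((12352 : Int) ≤ cp ∧ cp ≤ (12447 : Int)) from by omega)]
  rw [if_neg (show ¬((12448 : Int) ≤ cp ∧ cp ≤ (12543 : Int)) from by omega)]
  rw [if_neg (show ¬((1536 : Int) ≤ cp ∧ cp ≤ (1791 : Int)) from by omega)]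
  rw [if_neg (show ¬((1024 : Int) ≤ cp ∧ cp ≤ (1279 : Int)) from by omega)]
  rw [if_neg (show ¬((2304 : Int) ≤ cp ∧ cp ≤ (2431 : Int)) from by omega)]
  rw [if_neg (show ¬((2432 : Int) ≤ cp ∧ cp ≤ (2559 : Int)) from by omega)]
  rw [if_neg (show ¬((3584 : Int) ≤ cp ∧ cp ≤ (3711 : Int)) from by omega)]
  by_cases hE : cp ≤ (1023 : Int)
  · rw [if_pos (show (880 : Int) ≤ cp ∧ cp ≤ (1023 : Int) from ⟨by omega, hE⟩), if_pos hE]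
    rfl
  · rw [if_neg (show ¬((880 : Int) ≤ cp ∧ cp ≤ (1023 : Int)) from fun h => hE h.2)]
    rw [if_neg (show ¬((1424 : Int) ≤ cp ∧ cp ≤ (1535 : Int)) from by omega)]
    rw [if_neg hE]
    rfl

theorem pvCase5 (cp : Int) (hL : (1024 : Int) ≤ cp) (hU : cp < (1424 : Int)) :
    classify_char_py cp = (if cp ≤ (1279 : Int) then some "Cyrl" else none) := by
  rw [pvA_or, pvLatin_eq, pvScript_eq]
  rw [if_neg (show ¬((65 : Int) ≤ cp ∧ cp ≤ (90 : Int)) from by omega)]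
  rw [if_neg (show ¬((97 : Int) ≤ cp ∧ cp ≤ (122 : Int)) from by omega)]
  rw [if_neg (show ¬((192 : Int) ≤ cp ∧ cp ≤ (591 : Int)) from by omega)]
  rw [if_neg (show ¬((44032 : Int) ≤ cp ∧ cp ≤ (55203 : Int)) from by omega)]
  rw [if_neg (show ¬((19968 : Int) ≤ cp ∧ cp ≤ (40959 : Int)) from by omega)]
  rw [if_neg (show ¬((12352 : Int) ≤ cp ∧ cp ≤ (12447 : Int)) from by omega)]
  rw [if_neg (show ¬((12448 : Int) ≤ cp ∧ cp ≤ (12543 : Int)) from by omega)]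
  rw [if_neg (show ¬((1536 : Int) ≤ cp ∧ cp ≤ (1791 : Int)) from by omega)]
  by_cases hE : cp ≤ (1279 : Int)
  · rw [if_pos (show (1024 : Int) ≤ cp ∧ cp ≤ (1279 : Int) from ⟨by omega, hE⟩), if_pos hE]
    rfl
  · rw [if_neg (show ¬((1024 : Int) ≤ cp ∧ cp ≤ (1279 : Int)) from fun h => hE h.2)]
    rw [if_neg (show ¬((2304 : Int) ≤ cp ∧ cp ≤ (2431 : Int)) from by omega)]
    rw [if_neg (show ¬((2432 : Int) ≤ cp ∧ cp ≤ (2559 : Int)) from by omega)]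
    rw [if_neg (show ¬((3584 : Int) ≤ cp ∧ cp ≤ (3711 : Int)) from by omega)]
    rw [if_neg (show ¬((880 : Int) ≤ cp ∧ cp ≤ (1023 : Int)) from by omega)]
    rw [if_neg (show ¬((1424 : Int) ≤ cp ∧ cp ≤ (1535 : Int)) from by omega)]
    rw [if_neg hE]
    rfl

theorem pvCase6 (cp : Int) (hL : (1424 : Int) ≤ cp) (hU : cp < (1536 : Int)) :
    classify_char_py cp = (if cp ≤ (1535 : Int) then some "Hebr" else none) := by
  rw [pvA_or, pvLatin_eq, pvScript_eq]
  rw [if_neg (show ¬((65 : Int) ≤ cp ∧ cp ≤ (90 : Int)) from by omega)]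
  rw [if_neg (show ¬((97 : Int) ≤ cp ∧ cp ≤ (122 : Int)) from by omega)]
  rw [if_neg (show ¬((192 : Int) ≤ cp ∧ cp ≤ (591 : Int)) from by omega)]
  rw [if_neg (show ¬((44032 : Int) ≤ cp ∧ cp ≤ (55203 : Int)) from by omega)]
  rw [if_neg (show ¬((19968 : Int) ≤ cp ∧ cp ≤ (40959 : Int)) from by omega)]
  rw [if_neg (show ¬((12352 : Int) ≤ cp ∧ cp ≤ (12447 : Int)) from by omega)]
  rw [if_neg (show ¬((12448 : Int) ≤ cp ∧ cp ≤ (12543 : Int)) from by omega)]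
  rw [if_neg (show ¬((1536 : Int) ≤ cp ∧ cp ≤ (1791 : Int)) from by omega)]
  rw [if_neg (show ¬((1024 : Int) ≤ cp ∧ cp ≤ (1279 : Int)) from by omega)]
  rw [if_neg (show ¬((2304 : Int) ≤ cp ∧ cp ≤ (2431 : Int)) from by omega)]
  rw [if_neg (show ¬((2432 : Int) ≤ cp ∧ cp ≤ (2559 : Int)) from by omega)]
  rw [if_neg (show ¬((3584 : Int) ≤ cp ∧ cp ≤ (3711 : Int)) from by omega)]
  rw [if_neg (show ¬((880 : Int) ≤ cp ∧ cp ≤ (1023 : Int)) from by omega)]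
  by_cases hE : cp ≤ (1535 : Int)
  · rw [if_pos (show (1424 : Int) ≤ cp ∧ cp ≤ (1535 : Int) from ⟨by omega, hE⟩), if_pos hE]
    rfl
  · rw [if_neg (show ¬((1424 : Int) ≤ cp ∧ cp ≤ (1535 : Int)) from fun h => hE h.2)]
    rw [if_neg hE]
    rfl

theorem pvCase7 (cp : Int) (hL : (1536 : Int) ≤ cp) (hU : cp < (2304 : Int)) :
    classify_char_py cp = (if cp ≤ (1791 : Int) then some "Arab" else none) := by
  rw [pvA_or, pvLatin_eq, pvScript_eq]
  rw [if_neg (show ¬((65 : Int) ≤ cp ∧ cp ≤ (90 : Int)) from by omega)]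
  rw [if_neg (show ¬((97 : Int) ≤ cp ∧ cp ≤ (122 : Int)) from by omega)]
  rw [if_neg (show ¬((192 : Int) ≤ cp ∧ cp ≤ (591 : Int)) from by omega)]
  rw [if_neg (show ¬((44032 : Int) ≤ cp ∧ cp ≤ (55203 : Int)) from by omega)]
  rw [if_neg (show ¬((19968 : Int) ≤ cp ∧ cp ≤ (40959 : Int)) from by omega)]
  rw [if_neg (show ¬((12352 : Int) ≤ cp ∧ cp ≤ (12447 : Int)) from by omega)]
  rw [if_neg (show ¬((12448 : Int) ≤ cp ∧ cp ≤ (12543 : Int)) from by omega)]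
  by_cases hE : cp ≤ (1791 : Int)
  · rw [if_pos (show (1536 : Int) ≤ cp ∧ cp ≤ (1791 : Int) from ⟨by omega, hE⟩), if_pos hE]
    rfl
  · rw [if_neg (show ¬((1536 : Int) ≤ cp ∧ cp ≤ (1791 : Int)) from fun h => hE h.2)]
    rw [if_neg (show ¬((1024 : Int) ≤ cp ∧ cp ≤ (1279 : Int)) from by omega)]
    rw [if_neg (show ¬((2304 : Int) ≤ cp ∧ cp ≤ (2431 : Int)) from by omega)]
    rw [if_neg (show ¬((2432 : Int) ≤ cp ∧ cp ≤ (2559 : Int)) from by omega)]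
    rw [if_neg (show ¬((3584 : Int) ≤ cp ∧ cp ≤ (3711 : Int)) from by omega)]
    rw [if_neg (show ¬((880 : Int) ≤ cp ∧ cp ≤ (1023 : Int)) from by omega)]
    rw [if_neg (show ¬((1424 : Int) ≤ cp ∧ cp ≤ (1535 : Int)) from by omega)]
    rw [if_neg hE]
    rfl

theorem pvCase8 (cp : Int) (hL : (2304 : Int) ≤ cp) (hU : cp < (2432 : Int)) :
    classify_char_py cp = (if cp ≤ (2431 : Int) then some "Deva" else none) := by
  rw [pvA_or, pvLatin_eq, pvScript_eq]
  rw [if_neg (show ¬((65 : Int) ≤ cp ∧ cp ≤ (90 : Int)) from by omega)]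
  rw [if_neg (show ¬((97 : Int) ≤ cp ∧ cp ≤ (122 : Int)) from by omega)]
  rw [if_neg (show ¬((192 : Int) ≤ cp ∧ cp ≤ (591 : Int)) from by omega)]
  rw [if_neg (show ¬((44032 : Int) ≤ cp ∧ cp ≤ (55203 : Int)) from by omega)]
  rw [if_neg (show ¬((19968 : Int) ≤ cp ∧ cp ≤ (40959 : Int)) from by omega)]
  rw [if_neg (show ¬((12352 : Int) ≤ cp ∧ cp ≤ (12447 : Int)) from by omega)]
  rw [if_neg (show ¬((12448 : Int) ≤ cp ∧ cp ≤ (12543 : Int)) from by omega)]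
  rw [if_neg (show ¬((1536 : Int) ≤ cp ∧ cp ≤ (1791 : Int)) from by omega)]
  rw [if_neg (show ¬((1024 : Int) ≤ cp ∧ cp ≤ (1279 : Int)) from by omega)]
  by_cases hE : cp ≤ (2431 : Int)
  · rw [if_pos (show (2304 : Int) ≤ cp ∧ cp ≤ (2431 : Int) from ⟨by omega, hE⟩), if_pos hE]
    rfl
  · rw [if_neg (show ¬((2304 : Int) ≤ cp ∧ cp ≤ (2431 : Int)) from fun h => hE h.2)]
    rw [if_neg (show ¬((2432 : Int) ≤ cp ∧ cp ≤ (2559 : Int)) from by omega)]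
    rw [if_neg (show ¬((3584 : Int) ≤ cp ∧ cp ≤ (3711 : Int)) from by omega)]
    rw [if_neg (show ¬((880 : Int) ≤ cp ∧ cp ≤ (1023 : Int)) from by omega)]
    rw [if_neg (show ¬((1424 : Int) ≤ cp ∧ cp ≤ (1535 : Int)) from by omega)]
    rw [if_neg hE]
    rfl

theorem pvCase9 (cp : Int) (hL : (2432 : Int) ≤ cp) (hU : cp < (3584 : Int)) :
    classify_char_py cp = (if cp ≤ (2559 : Int) then some "Beng" else none) := by
  rw [pvA_or, pvLatin_eq, pvScript_eq]
  rw [if_neg (show ¬((65 : Int) ≤ cp ∧ cp ≤ (90 : Int)) from by omega)]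
  rw [if_neg (show ¬((97 : Int) ≤ cp ∧ cp ≤ (122 : Int)) from by omega)]
  rw [if_neg (show ¬((192 : Int) ≤ cp ∧ cp ≤ (591 : Int)) from by omega)]
  rw [if_neg (show ¬((44032 : Int) ≤ cp ∧ cp ≤ (55203 : Int)) from by omega)]
  rw [if_neg (show ¬((19968 : Int) ≤ cp ∧ cp ≤ (40959 : Int)) from by omega)]
  rw [if_neg (show ¬((12352 : Int) ≤ cp ∧ cp ≤ (12447 : Int)) from by omega)]
  rw [if_neg (show ¬((12448 : Int) ≤ cp ∧ cp ≤ (12543 : Int)) from by omega)]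
  rw [if_neg (show ¬((1536 : Int) ≤ cp ∧ cp ≤ (1791 : Int)) from by omega)]
  rw [if_neg (show ¬((1024 : Int) ≤ cp ∧ cp ≤ (1279 : Int)) from by omega)]
  rw [if_neg (show ¬((2304 : Int) ≤ cp ∧ cp ≤ (2431 : Int)) from by omega)]
  by_cases hE : cp ≤ (2559 : Int)
  · rw [if_pos (show (2432 : Int) ≤ cp ∧ cp ≤ (2559 : Int) from ⟨by omega, hE⟩), if_pos hE]
    rfl
  · rw [if_neg (show ¬((2432 : Int) ≤ cp ∧ cp ≤ (2559 : Int)) from fun h => hE h.2)]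
    rw [if_neg (show ¬((3584 : Int) ≤ cp ∧ cp ≤ (3711 : Int)) from by omega)]
    rw [if_neg (show ¬((880 : Int) ≤ cp ∧ cp ≤ (1023 : Int)) from by omega)]
    rw [if_neg (show ¬((1424 : Int) ≤ cp ∧ cp ≤ (1535 : Int)) from by omega)]
    rw [if_neg hE]
    rfl

theorem pvCase10 (cp : Int) (hL : (3584 : Int) ≤ cp) (hU : cp < (12352 : Int)) :
    classify_char_py cp = (if cp ≤ (3711 : Int) then some "Thai" else none) := by
  rw [pvA_or, pvLatin_eq, pvScript_eq]
  rw [if_neg (show ¬((65 : Int) ≤ cp ∧ cp ≤ (90 : Int)) from by omega)]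
  rw [if_neg (show ¬((97 : Int) ≤ cp ∧ cp ≤ (122 : Int)) from by omega)]
  rw [if_neg (show ¬((192 : Int) ≤ cp ∧ cp ≤ (591 : Int)) from by omega)]
  rw [if_neg (show ¬((44032 : Int) ≤ cp ∧ cp ≤ (55203 : Int)) from by omega)]
  rw [if_neg (show ¬((19968 : Int) ≤ cp ∧ cp ≤ (40959 : Int)) from by omega)]
  rw [if_neg (show ¬((12352 : Int) ≤ cp ∧ cp ≤ (12447 : Int)) from by omega)]
  rw [if_neg (show ¬((12448 : Int) ≤ cp ∧ cp ≤ (12543 : Int)) from by omega)]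
  rw [if_neg (show ¬((1536 : Int) ≤ cp ∧ cp ≤ (1791 : Int)) from by omega)]
  rw [if_neg (show ¬((1024 : Int) ≤ cp ∧ cp ≤ (1279 : Int)) from by omega)]
  rw [if_neg (show ¬((2304 : Int) ≤ cp ∧ cp ≤ (2431 : Int)) from by omega)]
  rw [if_neg (show ¬((2432 : Int) ≤ cp ∧ cp ≤ (2559 : Int)) from by omega)]
  by_cases hE : cp ≤ (3711 : Int)
  · rw [if_pos (show (3584 : Int) ≤ cp ∧ cp ≤ (3711 : Int) from ⟨by omega, hE⟩), if_pos hE]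
    rfl
  · rw [if_neg (show ¬((3584 : Int) ≤ cp ∧ cp ≤ (3711 : Int)) from fun h => hE h.2)]
    rw [if_neg (show ¬((880 : Int) ≤ cp ∧ cp ≤ (1023 : Int)) from by omega)]
    rw [if_neg (show ¬((1424 : Int) ≤ cp ∧ cp ≤ (1535 : Int)) from by omega)]
    rw [if_neg hE]
    rfl

theorem pvCase11 (cp : Int) (hL : (12352 : Int) ≤ cp) (hU : cp < (12448 : Int)) :
    classify_char_py cp = (if cp ≤ (12447 : Int) then some "Hira" else none) := by
  rw [pvA_or, pvLatin_eq, pvScript_eq]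
  rw [if_neg (show ¬((65 : Int) ≤ cp ∧ cp ≤ (90 : Int)) from by omega)]
  rw [if_neg (show ¬((97 : Int) ≤ cp ∧ cp ≤ (122 : Int)) from by omega)]
  rw [if_neg (show ¬((192 : Int) ≤ cp ∧ cp ≤ (591 : Int)) from by omega)]
  rw [if_neg (show ¬((44032 : Int) ≤ cp ∧ cp ≤ (55203 : Int)) from by omega)]
  rw [if_neg (show ¬((19968 : Int) ≤ cp ∧ cp ≤ (40959 : Int)) from by omega)]
  by_cases hE : cp ≤ (12447 : Int)
  · rw [if_pos (show (12352 : Int) ≤ cp ∧ cp ≤ (12447 : Int) from ⟨by omega, hE⟩), if_pos hE]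
    rfl
  · rw [if_neg (show ¬((12352 : Int) ≤ cp ∧ cp ≤ (12447 : Int)) from fun h => hE h.2)]
    rw [if_neg (show ¬((12448 : Int) ≤ cp ∧ cp ≤ (12543 : Int)) from by omega)]
    rw [if_neg (show ¬((1536 : Int) ≤ cp ∧ cp ≤ (1791 : Int)) from by omega)]
    rw [if_neg (show ¬((1024 : Int) ≤ cp ∧ cp ≤ (1279 : Int)) from by omega)]
    rw [if_neg (show ¬((2304 : Int) ≤ cp ∧ cp ≤ (2431 : Int)) from by omega)]
    rw [if_neg (show ¬((2432 : Int) ≤ cp ∧ cp ≤ (2559 : Int)) from by omega)]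
    rw [if_neg (show ¬((3584 : Int) ≤ cp ∧ cp ≤ (3711 : Int)) from by omega)]
    rw [if_neg (show ¬((880 : Int) ≤ cp ∧ cp ≤ (1023 : Int)) from by omega)]
    rw [if_neg (show ¬((1424 : Int) ≤ cp ∧ cp ≤ (1535 : Int)) from by omega)]
    rw [if_neg hE]
    rfl

theorem pvCase12 (cp : Int) (hL : (12448 : Int) ≤ cp) (hU : cp < (19968 : Int)) :
    classify_char_py cp = (if cp ≤ (12543 : Int) then some "Kana" else none) := by
  rw [pvA_or, pvLatin_eq, pvScript_eq]
  rw [if_neg (show ¬((65 : Int) ≤ cp ∧ cp ≤ (90 : Int)) from by omega)]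
  rw [if_neg (show ¬((97 : Int) ≤ cp ∧ cp ≤ (122 : Int)) from by omega)]
  rw [if_neg (show ¬((192 : Int) ≤ cp ∧ cp ≤ (591 : Int)) from by omega)]
  rw [if_neg (show ¬((44032 : Int) ≤ cp ∧ cp ≤ (55203 : Int)) from by omega)]
  rw [if_neg (show ¬((19968 : Int) ≤ cp ∧ cp ≤ (40959 : Int)) from by omega)]
  rw [if_neg (show ¬((12352 : Int) ≤ cp ∧ cp ≤ (12447 : Int)) from by omega)]
  by_cases hE : cp ≤ (12543 : Int)
  · rw [if_pos (show (12448 : Int) ≤ cp ∧ cp ≤ (12543 : Int) from ⟨by omega, hE⟩), if_pos hE]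
    rfl
  · rw [if_neg (show ¬((12448 : Int) ≤ cp ∧ cp ≤ (12543 : Int)) from fun h => hE h.2)]
    rw [if_neg (show ¬((1536 : Int) ≤ cp ∧ cp ≤ (1791 : Int)) from by omega)]
    rw [if_neg (show ¬((1024 : Int) ≤ cp ∧ cp ≤ (1279 : Int)) from by omega)]
    rw [if_neg (show ¬((2304 : Int) ≤ cp ∧ cp ≤ (2431 : Int)) from by omega)]
    rw [if_neg (show ¬((2432 : Int) ≤ cp ∧ cp ≤ (2559 : Int)) from by omega)]
    rw [if_neg (show ¬((3584 : Int) ≤ cp ∧ cp ≤ (3711 : Int)) from by omega)]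
    rw [if_neg (show ¬((880 : Int) ≤ cp ∧ cp ≤ (1023 : Int)) from by omega)]
    rw [if_neg (show ¬((1424 : Int) ≤ cp ∧ cp ≤ (1535 : Int)) from by omega)]
    rw [if_neg hE]
    rfl

theorem pvCase13 (cp : Int) (hL : (19968 : Int) ≤ cp) (hU : cp < (44032 : Int)) :
    classify_char_py cp = (if cp ≤ (40959 : Int) then some "Hani" else none) := by
  rw [pvA_or, pvLatin_eq, pvScript_eq]
  rw [if_neg (show ¬((65 : Int) ≤ cp ∧ cp ≤ (90 : Int)) from by omega)]
  rw [if_neg (show ¬((97 : Int) ≤ cp ∧ cp ≤ (122 : Int)) from by omega)]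
  rw [if_neg (show ¬((192 : Int) ≤ cp ∧ cp ≤ (591 : Int)) from by omega)]
  rw [if_neg (show ¬((44032 : Int) ≤ cp ∧ cp ≤ (55203 : Int)) from by omega)]
  by_cases hE : cp ≤ (40959 : Int)
  · rw [if_pos (show (19968 : Int) ≤ cp ∧ cp ≤ (40959 : Int) from ⟨by omega, hE⟩), if_pos hE]
    rfl
  · rw [if_neg (show ¬((19968 : Int) ≤ cp ∧ cp ≤ (40959 : Int)) from fun h => hE h.2)]
    rw [if_neg (show ¬((12352 : Int) ≤ cp ∧ cp ≤ (12447 : Int)) from by omega)]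
    rw [if_neg (show ¬((12448 : Int) ≤ cp ∧ cp ≤ (12543 : Int)) from by omega)]
    rw [if_neg (show ¬((1536 : Int) ≤ cp ∧ cp ≤ (1791 : Int)) from by omega)]
    rw [if_neg (show ¬((1024 : Int) ≤ cp ∧ cp ≤ (1279 : Int)) from by omega)]
    rw [if_neg (show ¬((2304 : Int) ≤ cp ∧ cp ≤ (2431 : Int)) from by omega)]
    rw [if_neg (show ¬((2432 : Int) ≤ cp ∧ cp ≤ (2559 : Int)) from by omega)]
    rw [if_neg (show ¬((3584 : Int) ≤ cp ∧ cp ≤ (3711 : Int)) from by omega)]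
    rw [if_neg (show ¬((880 : Int) ≤ cp ∧ cp ≤ (1023 : Int)) from by omega)]
    rw [if_neg (show ¬((1424 : Int) ≤ cp ∧ cp ≤ (1535 : Int)) from by omega)]
    rw [if_neg hE]
    rfl

theorem pvCase14 (cp : Int) (hL : (44032 : Int) ≤ cp) :
    classify_char_py cp = (if cp ≤ (55203 : Int) then some "Hang" else none) := by
  rw [pvA_or, pvLatin_eq, pvScript_eq]
  rw [if_neg (show ¬((65 : Int) ≤ cp ∧ cp ≤ (90 : Int)) from by omega)]
  rw [if_neg (show ¬((97 : Int) ≤ cp ∧ cp ≤ (122 : Int)) from by omega)]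
  rw [if_neg (show ¬((192 : Int) ≤ cp ∧ cp ≤ (591 : Int)) from by omega)]
  by_cases hE : cp ≤ (55203 : Int)
  · rw [if_pos (show (44032 : Int) ≤ cp ∧ cp ≤ (55203 : Int) from ⟨by omega, hE⟩), if_pos hE]
    rfl
  · rw [if_neg (show ¬((44032 : Int) ≤ cp ∧ cp ≤ (55203 : Int)) from fun h => hE h.2)]
    rw [if_neg (show ¬((19968 : Int) ≤ cp ∧ cp ≤ (40959 : Int)) from by omega)]
    rw [if_neg (show ¬((12352 : Int) ≤ cp ∧ cp ≤ (12447 : Int)) from by omega)]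
    rw [if_neg (show ¬((12448 : Int) ≤ cp ∧ cp ≤ (12543 : Int)) from by omega)]
    rw [if_neg (show ¬((1536 : Int) ≤ cp ∧ cp ≤ (1791 : Int)) from by omega)]
    rw [if_neg (show ¬((1024 : Int) ≤ cp ∧ cp ≤ (1279 : Int)) from by omega)]
    rw [if_neg (show ¬((2304 : Int) ≤ cp ∧ cp ≤ (2431 : Int)) from by omega)]
    rw [if_neg (show ¬((2432 : Int) ≤ cp ∧ cp ≤ (2559 : Int)) from by omega)]
    rw [if_neg (show ¬((3584 : Int) ≤ cp ∧ cp ≤ (3711 : Int)) from by omega)]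
    rw [if_neg (show ¬((880 : Int) ≤ cp ∧ cp ≤ (1023 : Int)) from by omega)]
    rw [if_neg (show ¬((1424 : Int) ≤ cp ∧ cp ≤ (1535 : Int)) from by omega)]
    rw [if_neg hE]
    rfl

-- ===== VERDICT (by name: the statement is the Claim_ definition above) =====
set_option maxHeartbeats 1000000 in
theorem classify_char_py_spec : Claim_equal_classify_char_py := by
  intro cp _
  unfold Spec_classify_char_py
  obtain ⟨h2, h3, h4⟩ := pvBisect_spec pvStarts cp pvStarts_sorted pvStarts.length
    0 pvStarts.length rfl (by omega) le_rfl (by omega) (fun j hj hjl => absurd hjl (by omega))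
  have e0 : pvStarts.getD 0 0 = (65 : Int) := rfl
  have e1 : pvStarts.getD 1 0 = (97 : Int) := rfl
  have e2 : pvStarts.getD 2 0 = (192 : Int) := rfl
  have e3 : pvStarts.getD 3 0 = (880 : Int) := rfl
  have e4 : pvStarts.getD 4 0 = (1024 : Int) := rfl
  have e5 : pvStarts.getD 5 0 = (1424 : Int) := rfl
  have e6 : pvStarts.getD 6 0 = (1536 : Int) := rfl
  have e7 : pvStarts.getD 7 0 = (2304 : Int) := rfl
  have e8 : pvStarts.getD 8 0 = (2432 : Int) := rfl
  have e9 : pvStarts.getD 9 0 = (3584 : Int) := rfl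
  have e10 : pvStarts.getD 10 0 = (12352 : Int) := rfl
  have e11 : pvStarts.getD 11 0 = (12448 : Int) := rfl
  have e12 : pvStarts.getD 12 0 = (19968 : Int) := rfl
  have e13 : pvStarts.getD 13 0 = (44032 : Int) := rfl
  show classify_char_py cp = classify_char_py_alt cp
  unfold classify_char_py_alt
  generalize hg : pvBisectRight pvStarts cp 0 pvStarts.length = r at h3 h4 ⊢
  rw [hg] at h2
  have hlen14 : pvStarts.length = 14 := rfl
  rw [hlen14] at h2 h4
  have h2' : r ≤ 14 := h2
  interval_cases r
  · exact pvCase0 cp (by simpa only [e0] using h4 0 (by omega) (by omega))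
  · exact pvCase1 cp (by simpa only [e0] using h3 0 (by omega)) (by simpa only [e1] using h4 1 (by omega) (by omega))
  · exact pvCase2 cp (by simpa only [e1] using h3 1 (by omega)) (by simpa only [e2] using h4 2 (by omega) (by omega))
  · exact pvCase3 cp (by simpa only [e2] using h3 2 (by omega)) (by simpa only [e3] using h4 3 (by omega) (by omega))
  · exact pvCase4 cp (by simpa only [e3] using h3 3 (by omega)) (by simpa only [e4] using h4 4 (by omega) (by omega))
  · exact pvCase5 cp (by simpa only [e4] using h3 4 (by omega)) (by simpa only [e5] using h4 5 (by omega) (by omega))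
  · exact pvCase6 cp (by simpa only [e5] using h3 5 (by omega)) (by simpa only [e6] using h4 6 (by omega) (by omega))
  · exact pvCase7 cp (by simpa only [e6] using h3 6 (by omega)) (by simpa only [e7] using h4 7 (by omega) (by omega))
  · exact pvCase8 cp (by simpa only [e7] using h3 7 (by omega)) (by simpa only [e8] using h4 8 (by omega) (by omega))
  · exact pvCase9 cp (by simpa only [e8] using h3 8 (by omega)) (by simpa only [e9] using h4 9 (by omega) (by omega))
  · exact pvCase10 cp (by simpa only [e9] using h3 9 (by omega)) (by simpa only [e10] using h4 10 (by omega) (by omega))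
  · exact pvCase11 cp (by simpa only [e10] using h3 10 (by omega)) (by simpa only [e11] using h4 11 (by omega) (by omega))
  · exact pvCase12 cp (by simpa only [e11] using h3 11 (by omega)) (by simpa only [e12] using h4 12 (by omega) (by omega))
  · exact pvCase13 cp (by simpa only [e12] using h3 12 (by omega)) (by simpa only [e13] using h4 13 (by omega) (by omega))
  · exact pvCase14 cp (by simpa only [e13] using h3 13 (by omega))
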